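-- pv_equiv track=rewrite | github.com/Adrien-Amour/adriq | adriq/ad9910.py | auxiliary_dac_bytes
-- ===== SOURCE A (Python) =====
-- def auxiliary_dac_bytes(Code):
--     bits = [0] * 32
--     Code_Bin = format(Code, '08b')
--     bits[30:32] = [0] * 2  # Bits 31-30: Open (set to 0)
--     bits[0:8] = [int(Code_Bin[7-i]) for i in range(8)]
--     bitstring = bits[::-1] # reverse the inputs to get the desired bitstring (bit ordering convention is the opposite to string ordering)
--     # Convert the bits list to a single string of bits
--     bitstring = bits[::-1] # reverse the inputs to get the desired bitstring (bit ordering convention is the opposite to string ordering)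
--     bitstring = ''.join(map(str, bitstring))
--
--     # Convert the bits to four bytes
--     byte1 = int(bitstring[0:8], 2)
--     byte2 = int(bitstring[8:16], 2)
--     byte3 = int(bitstring[16:24], 2)
--     byte4 = int(bitstring[24:32], 2)
--
--     return [byte1, byte2, byte3, byte4]
-- ===== SOURCE B (Python) =====
-- def auxiliary_dac_bytes(Code):
--     byte4 = 0
--     for ch in format(Code, '08b')[:8]:
--         byte4 = byte4 * 2 + int(ch)
--     return [0, 0, 0, byte4]
-- ===== Notes on version B (the rewrite author's own statement) =====
-- stated objective: simpler
-- what changed: B drops the 32-slot bit list, the double reversal and the string join/parse round-trip: bytes 1-3 are constant 0, and the last byte is computed directly by Horner accumulation over the first 8 characters of format(Code,'08b').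
import Mathlib
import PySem

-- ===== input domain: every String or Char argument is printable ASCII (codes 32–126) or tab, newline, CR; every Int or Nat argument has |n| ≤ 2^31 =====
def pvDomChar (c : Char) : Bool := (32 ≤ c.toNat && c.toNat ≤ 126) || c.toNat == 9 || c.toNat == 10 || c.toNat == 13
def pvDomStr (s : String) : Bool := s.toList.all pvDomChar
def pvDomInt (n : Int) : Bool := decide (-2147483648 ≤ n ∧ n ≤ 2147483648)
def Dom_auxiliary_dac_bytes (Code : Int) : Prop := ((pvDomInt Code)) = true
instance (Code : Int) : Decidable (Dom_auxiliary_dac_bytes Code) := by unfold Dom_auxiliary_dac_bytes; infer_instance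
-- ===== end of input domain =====

-- B drops the 32-slot bit list and the string round-trip: only the last byte is nontrivial,
-- computed by Horner accumulation over the first 8 binary characters (objective: simpler).

-- ===== PORT A =====
-- Hand port of format(n, 'b') for n ≥ 0: binary digit characters, most significant first
-- (exact for n ≥ 0; negative Codes raise ValueError in Python and are excluded by Pre_).
def pvBinCore : Nat → List Char
  | 0 => []
  | n + 1 => pvBinCore ((n + 1) / 2) ++ [if (n + 1) % 2 = 1 then '1' else '0']
decreasing_by exact Nat.div_lt_self (Nat.succ_pos n) (by norm_num)

-- format(Code, '08b'): binary string left-padded with '0' to width 8 (exact for Code ≥ 0)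
def pvFormat08b (Code : Int) : List Char :=
  let s := if Code.toNat = 0 then ['0'] else pvBinCore Code.toNat
  List.replicate (8 - s.length) '0' ++ s

-- int(s, 2) on a string of binary digit characters (exact on such strings)
def pvInt2 (s : List Char) : Int := s.foldl (fun a c => a * 2 + ((c.toNat : Int) - 48)) 0

def auxiliary_dac_bytes (Code : Int) : List Int :=
  let bits : List Int := List.replicate 32 0                 -- bits = [0] * 32
  let codeBin := pvFormat08b Code                            -- Code_Bin = format(Code, '08b')
  let bits := bits.take 30 ++ [0, 0]                         -- bits[30:32] = [0] * 2
  -- bits[0:8] = [int(Code_Bin[7-i]) for i in range(8)]  (int(ch) ported as char code - 48; exact on digit chars)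
  let bits := ((List.range 8).map
      (fun i => ((codeBin.getD (7 - i) '0').toNat : Int) - 48)) ++ bits.drop 8
  let bitstring := bits.reverse                              -- bitstring = bits[::-1]
  let bitstring := bits.reverse ++ (bitstring.take 0)        -- repeated line in A (second assignment, same value)
  let bs : List Char := bitstring.flatMap
      (fun b => (PySem.Int.toStr b).toList)                  -- ''.join(map(str, bitstring))
  let byte1 := pvInt2 (bs.take 8)                            -- int(bitstring[0:8], 2)
  let byte2 := pvInt2 ((bs.drop 8).take 8)                   -- int(bitstring[8:16], 2)
  let byte3 := pvInt2 ((bs.drop 16).take 8)                  -- int(bitstring[16:24], 2)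
  let byte4 := pvInt2 ((bs.drop 24).take 8)                  -- int(bitstring[24:32], 2)
  [byte1, byte2, byte3, byte4]

-- ===== PORT B =====
def auxiliary_dac_bytes_alt (Code : Int) : List Int :=
  let s := (pvFormat08b Code).take 8                          -- format(Code, '08b')[:8]
  let byte4 := s.foldl (fun a c => a * 2 + ((c.toNat : Int) - 48)) 0  -- byte4 = byte4*2 + int(ch)
  [0, 0, 0, byte4]

-- ===== PRECONDITION & SPEC =====
-- Pre_ excludes Code < 0, on which Python's int('-') raises ValueError in both A and B.
def Pre_auxiliary_dac_bytes (Code : Int) : Prop := 0 ≤ Code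
instance (Code : Int) : Decidable (Pre_auxiliary_dac_bytes Code) := by
  unfold Pre_auxiliary_dac_bytes; infer_instance

def pvWitness_auxiliary_dac_bytes : Int := (37)

def Spec_auxiliary_dac_bytes (Code : Int) (out : List Int) : Prop := out = auxiliary_dac_bytes_alt Code
instance (Code : Int) (out : List Int) : Decidable (Spec_auxiliary_dac_bytes Code out) := by
  unfold Spec_auxiliary_dac_bytes; infer_instance

-- ===== CLAIM (what is proved, stated in full; the proofs are below) =====
def Claim_equal_auxiliary_dac_bytes : Prop := ∀ (Code : Int), Dom_auxiliary_dac_bytes Code → Pre_auxiliary_dac_bytes Code → Spec_auxiliary_dac_bytes Code (auxiliary_dac_bytes Code)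

-- ===== LEMMAS AND PROOFS =====

-- every character pvBinCore emits is '0' or '1'
theorem pvBinCore_binary : ∀ (n : Nat), ∀ c ∈ pvBinCore n, c = '0' ∨ c = '1' := by
  intro n
  induction n using Nat.strong_induction_on with
  | _ n ih =>
    intro c hc
    match n with
    | 0 => simp [pvBinCore] at hc
    | m + 1 =>
      rw [pvBinCore] at hc
      rcases List.mem_append.mp hc with h | h
      · exact ih _ (Nat.div_lt_self (Nat.succ_pos m) (by norm_num)) c h
      · rcases List.mem_singleton.mp h with rfl
        split <;> simp

theorem pvFormat08b_binary (Code : Int) : ∀ c ∈ pvFormat08b Code, c = '0' ∨ c = '1' := by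
  intro c hc
  unfold pvFormat08b at hc
  simp only [List.mem_append, List.mem_replicate] at hc
  rcases hc with h | h
  · exact Or.inl h.2
  · by_cases h0 : Code.toNat = 0
    · simp [h0] at h; exact Or.inl h
    · simp only [h0, ite_false] at h
      exact pvBinCore_binary _ c h

theorem pvFormat08b_len (Code : Int) : 8 ≤ (pvFormat08b Code).length := by
  unfold pvFormat08b
  simp only [List.length_append, List.length_replicate]
  omega

-- str(b) of a 0/1 value coming from a binary digit char is that char back
theorem toChars_digit (c : Char) (h : c = '0' ∨ c = '1') :
    PySem.Int.toChars ((c.toNat : Int) - 48) = [c] := by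
  rcases h with rfl | rfl <;> decide

theorem toChars_zero : PySem.Int.toChars 0 = ['0'] := by decide

-- ===== VERDICT (by name: the statement is the Claim_ definition above) =====
theorem auxiliary_dac_bytes_spec : Claim_equal_auxiliary_dac_bytes := by
  intro Code _ _
  unfold Spec_auxiliary_dac_bytes auxiliary_dac_bytes auxiliary_dac_bytes_alt
  have hlen := pvFormat08b_len Code
  have hbin := pvFormat08b_binary Code
  set cb := pvFormat08b Code with hcb
  clear_value cb
  match cb, hlen with
  | a :: b :: c :: d :: e :: f :: g :: h :: rest, _ =>
    have ha := hbin a (by simp); have hb := hbin b (by simp)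
    have hc := hbin c (by simp); have hd := hbin d (by simp)
    have he := hbin e (by simp); have hf := hbin f (by simp)
    have hg := hbin g (by simp); have hh := hbin h (by simp)
    simp only [List.range, List.range.loop, List.map, List.getD, List.getElem?_cons_zero,
      List.getElem?_cons_succ, Option.getD_some]
    norm_num [pvInt2, List.foldl, List.replicate, List.take, List.drop, List.reverse_cons,
      List.flatMap_cons, List.cons_append, List.nil_append, List.append_nil,
      toChars_zero, toChars_digit a ha, toChars_digit b hb, toChars_digit c hc,
      toChars_digit d hd, toChars_digit e he, toChars_digit f hf, toChars_digit g hg,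
      toChars_digit h hh]
    decide
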